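-- pv_equiv track=rewrite | github.com/imTraed/All | SEGUNDO SEMESTRE/All2/class.py | matriz_inferior
-- ===== SOURCE A (Python) =====
-- def matriz_inferior(matriz):
--     filas = len(matriz)
--     columnas = len(matriz[0]) if filas > 0 else 0
--     matriz_inferior = [[0] * columnas for _ in range(filas)]
--     for i in range(filas):
--         for j in range(columnas):
--             if i >= j:
--                 matriz_inferior[i][j] = matriz[i][j]
--     return matriz_inferior
-- ===== SOURCE B (Python) =====
-- def matriz_inferior(matriz):
--     filas = len(matriz)
--     columnas = len(matriz[0]) if filas > 0 else 0
--     res = []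
--     for i in range(filas):
--         k = min(i + 1, columnas)
--         res.append(matriz[i][:k] + [0] * (columnas - k))
--     return res
-- ===== Notes on version B (the rewrite author's own statement) =====
-- stated objective: simpler
-- what changed: Replaces the preallocated zero table and nested i/j loops with an i>=j test by a single per-row construction: slice the kept prefix matriz[i][:min(i+1,columnas)] and pad with zeros.
import Mathlib
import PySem

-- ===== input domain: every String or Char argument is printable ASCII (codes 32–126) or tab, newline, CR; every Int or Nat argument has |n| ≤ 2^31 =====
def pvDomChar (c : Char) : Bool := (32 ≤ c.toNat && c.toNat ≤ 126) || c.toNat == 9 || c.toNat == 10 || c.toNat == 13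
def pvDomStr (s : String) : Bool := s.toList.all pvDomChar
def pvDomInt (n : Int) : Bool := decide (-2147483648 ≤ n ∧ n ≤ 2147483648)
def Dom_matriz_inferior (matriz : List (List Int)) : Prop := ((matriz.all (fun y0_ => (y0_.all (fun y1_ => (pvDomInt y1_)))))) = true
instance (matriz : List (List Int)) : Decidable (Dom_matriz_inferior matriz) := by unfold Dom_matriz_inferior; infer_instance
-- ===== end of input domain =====

-- B replaces A's preallocated zero table and nested index loops (guarded by i >= j)
-- by building each output row directly: kept prefix slice plus zero padding (simpler).

-- ===== PORT A =====
-- nested loops over a preallocated zero matrix, assigning matriz_inferior[i][j] when i >= j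
def matriz_inferior (matriz : List (List Int)) : List (List Int) :=
  let filas := matriz.length
  let columnas := if filas > 0 then (matriz.headD []).length else 0
  let init := (List.range filas).map (fun _ => List.replicate columnas (0 : Int))
  (List.range filas).foldl (fun acc i =>
    (List.range columnas).foldl (fun a j =>
      if j ≤ i then a.set i ((a.getD i []).set j ((matriz.getD i []).getD j 0)) else a) acc) init

-- ===== PORT B =====
-- per-row: kept prefix matriz[i][:min(i+1,columnas)] plus zero padding
def matriz_inferior_alt (matriz : List (List Int)) : List (List Int) :=
  let filas := matriz.length
  let columnas := if filas > 0 then (matriz.headD []).length else 0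
  (List.range filas).map (fun i =>
    let k := min (i + 1) columnas
    (matriz.getD i []).take k ++ List.replicate (columnas - k) (0 : Int))

-- ===== PRECONDITION & SPEC =====
-- Pre_ excludes exactly the ragged inputs on which A raises IndexError: some row i is
-- shorter than min(i+1, columnas), so A's read matriz[i][j] goes out of range.
def Pre_matriz_inferior (matriz : List (List Int)) : Prop :=
  ∀ i < matriz.length, min (i + 1) ((matriz.headD []).length) ≤ (matriz.getD i []).length
instance (matriz : List (List Int)) : Decidable (Pre_matriz_inferior matriz) := by
  unfold Pre_matriz_inferior; infer_instance
def pvWitness_matriz_inferior : List (List Int) := [[1, 2, 3], [4, 5, 6], [7, 8, 9]]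
def Spec_matriz_inferior (matriz : List (List Int)) (out : List (List Int)) : Prop := out = matriz_inferior_alt matriz
instance (matriz : List (List Int)) (out : List (List Int)) : Decidable (Spec_matriz_inferior matriz out) := by unfold Spec_matriz_inferior; infer_instance

-- ===== CLAIM (what is proved, stated in full; the proofs are below) =====
def Claim_equal_matriz_inferior : Prop := ∀ (matriz : List (List Int)), Dom_matriz_inferior matriz → Pre_matriz_inferior matriz → Spec_matriz_inferior matriz (matriz_inferior matriz)

-- ===== LEMMAS AND PROOFS =====

theorem pv_getD_set {α : Type} (l : List α) (i j : Nat) (v d : α) :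
    (l.set i v).getD j d = if i = j ∧ i < l.length then v else l.getD j d := by
  simp only [List.getD, List.getElem?_set]
  by_cases hij : i = j
  · subst hij
    by_cases hi : i < l.length
    · simp [hi]
    · simp [hi]
  · simp [hij]

theorem pv_set_self {α : Type} (l : List α) (i : Nat) (d : α) (h : i < l.length) :
    l.set i (l.getD i d) = l := by
  apply List.ext_getElem
  · simp
  · intro n h1 h2
    rw [List.getElem_set]
    split_ifs with he
    · subst he; rw [List.getD_eq_getElem l d h]
    · rfl

-- the inner loop touches only row i of the matrix state
theorem pv_inner_set (v : Nat → Int) (i : Nat) :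
    ∀ (js : List Nat) (acc : List (List Int)), i < acc.length →
      js.foldl (fun a j => if j ≤ i then a.set i ((a.getD i []).set j (v j)) else a) acc
        = acc.set i (js.foldl (fun r j => if j ≤ i then r.set j (v j) else r) (acc.getD i [])) := by
  intro js
  induction js with
  | nil =>
    intro acc h
    simp only [List.foldl_nil]
    exact (pv_set_self acc i [] h).symm
  | cons j js ih =>
    intro acc h
    simp only [List.foldl_cons]
    by_cases hj : j ≤ i
    · simp only [if_pos hj]
      rw [ih _ (by simpa using h), pv_getD_set,
        if_pos (⟨rfl, h⟩ : i = i ∧ i < acc.length), List.set_set]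
    · simp only [if_neg hj]
      exact ih acc h

theorem pv_row_length (v : Nat → Int) (i : Nat) :
    ∀ (js : List Nat) (r : List Int),
      (js.foldl (fun r j => if j ≤ i then r.set j (v j) else r) r).length = r.length := by
  intro js
  induction js with
  | nil => intro r; rfl
  | cons j js ih => intro r; simp only [List.foldl_cons]; split_ifs <;> simp [ih]

theorem pv_row_getD (v : Nat → Int) (i : Nat) :
    ∀ (js : List Nat), js.Nodup → ∀ (r : List Int), (∀ j ∈ js, j < r.length) → ∀ j,
      (js.foldl (fun r j => if j ≤ i then r.set j (v j) else r) r).getD j 0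
        = if j ∈ js ∧ j ≤ i then v j else r.getD j 0 := by
  intro js
  induction js with
  | nil => intro _ r _ j; simp
  | cons k ks ih =>
    intro hnd r hlt j
    simp only [List.foldl_cons]
    have hk : k < r.length := hlt k (by simp)
    have hlen : ∀ j ∈ ks, j < (if k ≤ i then r.set k (v k) else r).length := by
      intro j hj; split_ifs <;> simp [hlt j (by simp [hj])]
    rw [ih (List.nodup_cons.mp hnd).2 _ hlen j]
    by_cases hjk : j = k
    · subst hjk
      have hnotin : j ∉ ks := (List.nodup_cons.mp hnd).1
      simp only [if_neg (by tauto : ¬(j ∈ ks ∧ j ≤ i))]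
      by_cases hji : j ≤ i
      · rw [if_pos hji, pv_getD_set, if_pos (⟨rfl, hk⟩ : j = j ∧ j < r.length)]
        simp [hji]
      · simp [hji]
    · have : (if k ≤ i then r.set k (v k) else r).getD j 0 = r.getD j 0 := by
        split_ifs with _
        · rw [pv_getD_set, if_neg (by omega)]
        · rfl
      rw [this]
      simp only [List.mem_cons]
      by_cases hin : j ∈ ks ∧ j ≤ i
      · simp [hin.1, hin.2]
      · rw [if_neg hin, if_neg (by tauto)]

-- outer loop: length preserved, rows updated independently
theorem pv_outer_length (f : Nat → List Int → List Int) :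
    ∀ (is' : List Nat) (acc : List (List Int)),
      (is'.foldl (fun a i => a.set i (f i (a.getD i []))) acc).length = acc.length := by
  intro is'
  induction is' with
  | nil => intro acc; rfl
  | cons i is' ih =>
    intro acc
    rw [List.foldl_cons, ih]
    simp

theorem pv_outer_getD (f : Nat → List Int → List Int) :
    ∀ (is' : List Nat), is'.Nodup → ∀ (acc : List (List Int)), (∀ i ∈ is', i < acc.length) → ∀ i,
      (is'.foldl (fun a i => a.set i (f i (a.getD i []))) acc).getD i []
        = if i ∈ is' then f i (acc.getD i []) else acc.getD i [] := by
  intro is'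
  induction is' with
  | nil => intro _ acc _ i; simp
  | cons k ks ih =>
    intro hnd acc hlt i
    simp only [List.foldl_cons]
    have hk : k < acc.length := hlt k (by simp)
    have hlen : ∀ j ∈ ks, j < (acc.set k (f k (acc.getD k []))).length := by
      intro j hj; simpa using hlt j (by simp [hj])
    rw [ih (List.nodup_cons.mp hnd).2 _ hlen i]
    by_cases hik : i = k
    · subst hik
      have hnotin : i ∉ ks := (List.nodup_cons.mp hnd).1
      rw [if_neg hnotin, pv_getD_set, if_pos (⟨rfl, hk⟩ : i = i ∧ i < acc.length), if_pos (by simp)]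
    · have : (acc.set k (f k (acc.getD k []))).getD i [] = acc.getD i [] := by
        rw [pv_getD_set, if_neg (by omega)]
      rw [this]
      simp [List.mem_cons, hik]

-- rewrite A's nested fold into independent row updates
theorem pv_A_eq_rows (m : List (List Int)) (c : Nat) :
    ∀ (is' : List Nat) (acc : List (List Int)), (∀ i ∈ is', i < acc.length) →
      is'.foldl (fun acc i =>
          (List.range c).foldl (fun a j =>
            if j ≤ i then a.set i ((a.getD i []).set j ((m.getD i []).getD j 0)) else a) acc) acc
        = is'.foldl (fun a i =>
            a.set i ((List.range c).foldl (fun r j =>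
              if j ≤ i then r.set j ((m.getD i []).getD j 0) else r) (a.getD i []))) acc := by
  intro is'
  induction is' with
  | nil => intro acc _; rfl
  | cons k ks ih =>
    intro acc hlt
    simp only [List.foldl_cons]
    rw [pv_inner_set (fun j => (m.getD k []).getD j 0) k _ acc (hlt k (by simp))]
    apply ih
    intro j hj
    simpa using hlt j (by simp [hj])

theorem pv_getD_replicate_zero (n i : Nat) : (List.replicate n (0 : Int)).getD i 0 = 0 := by
  rcases Nat.lt_or_ge i n with h | h
  · rw [List.getD_eq_getElem _ 0 (by simpa using h)]; simp
  · rw [List.getD_eq_default _ 0 (by simpa using h)]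

theorem pv_getD_take (l : List Int) (k j : Nat) (h : j < k) (h2 : k ≤ l.length) :
    (l.take k).getD j 0 = l.getD j 0 := by
  rw [List.getD_eq_getElem _ 0 (by rw [List.length_take]; omega),
    List.getElem_take, List.getD_eq_getElem _ 0 (by omega)]

theorem pv_main (m : List (List Int)) (c n : Nat)
    (hpre : ∀ i < n, min (i + 1) c ≤ (m.getD i []).length) :
    List.foldl (fun acc i => List.foldl
        (fun a j => if j ≤ i then a.set i ((a.getD i []).set j ((m.getD i []).getD j 0)) else a)
        acc (List.range c))
      (List.map (fun _ => List.replicate c (0 : Int)) (List.range n)) (List.range n)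
    = List.map (fun i =>
        List.take (min (i + 1) c) (m.getD i []) ++ List.replicate (c - min (i + 1) c) (0 : Int))
      (List.range n) := by
  have hinit : ∀ i ∈ List.range n,
      i < (List.map (fun _ => List.replicate c (0 : Int)) (List.range n)).length := by
    intro i hi; simpa using List.mem_range.mp hi
  rw [pv_A_eq_rows m c (List.range n) _ hinit]
  apply List.ext_getElem
  · rw [pv_outer_length (fun i r => List.foldl (fun r j => if j ≤ i then r.set j ((m.getD i []).getD j 0) else r) r (List.range c))]; simp
  · intro i hiA hiB
    have hi : i < n := by rw [pv_outer_length (fun i r => List.foldl (fun r j => if j ≤ i then r.set j ((m.getD i []).getD j 0) else r) r (List.range c))] at hiA; simpa using hiA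
    have hrowA := pv_outer_getD
      (fun i r => List.foldl (fun r j => if j ≤ i then r.set j ((m.getD i []).getD j 0) else r)
        r (List.range c))
      (List.range n) (List.nodup_range) _ hinit i
    have hinitD : (List.map (fun _ => List.replicate c (0 : Int)) (List.range n)).getD i []
        = List.replicate c (0 : Int) := by
      rw [List.getD_eq_getElem _ _ (by simpa using hi)]; simp
    rw [← List.getD_eq_getElem _ [] hiA, hrowA, if_pos (List.mem_range.mpr hi), hinitD,
      List.getElem_map, List.getElem_range]
    apply List.ext_getElem
    · have hk := hpre i hi
      rw [pv_row_length (fun j => (m.getD i []).getD j 0) i]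
      simp only [List.length_replicate, List.length_append, List.length_take]
      omega
    · intro j hjA hjB
      have hjc : j < c := by rw [pv_row_length (fun j => (m.getD i []).getD j 0) i] at hjA; simpa using hjA
      have hb : ∀ j ∈ List.range c, j < (List.replicate c (0 : Int)).length := by
        intro j hj; simpa using List.mem_range.mp hj
      rw [← List.getD_eq_getElem _ 0 hjA, ← List.getD_eq_getElem _ 0 hjB,
        pv_row_getD (fun j => (m.getD i []).getD j 0) i (List.range c) (List.nodup_range) _ hb]
      have hk := hpre i hi
      by_cases hji : j ≤ i
      · have h1 : j < (List.take (min (i + 1) c) (m.getD i [])).length := by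
          rw [List.length_take]; omega
        rw [if_pos ⟨List.mem_range.mpr hjc, hji⟩, List.getD_append _ _ _ _ h1,
          pv_getD_take _ _ _ (by omega) (by omega)]
      · have h2 : (List.take (min (i + 1) c) (m.getD i [])).length ≤ j := by
          rw [List.length_take]; omega
        rw [if_neg (by tauto), List.getD_append_right _ _ _ _ h2,
          pv_getD_replicate_zero, pv_getD_replicate_zero]

-- ===== VERDICT (by name: the statement is the Claim_ definition above) =====
theorem matriz_inferior_spec : Claim_equal_matriz_inferior := by
  intro m _ hpre
  unfold Spec_matriz_inferior
  cases m with
  | nil => rfl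
  | cons r0 rest =>
    have hpre' : ∀ i < (r0 :: rest).length,
        min (i + 1) r0.length ≤ ((r0 :: rest).getD i []).length := by
      intro i hi; simpa using hpre i hi
    exact pv_main (r0 :: rest) r0.length (r0 :: rest).length hpre'
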